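-- pv_equiv track=rewrite | github.com/ishratjabenbushra-source/NLP_project_repo | src/data_utils.py | create_csft_samples
-- ===== SOURCE A (Python) =====
-- def create_csft_samples(train_sequences, max_seq_len=10):
--     """
--     Create CSFT training samples from sequences.
--
--     Each sample:
--         (history, target)
--
--     Args:
--         train_sequences (dict): {user_id: [item_ids]}
--         max_seq_len (int): Maximum history length
--
--     Returns:
--         list: List of (history, target) tuples
--     """
--     samples = []
--
--     for seq in train_sequences.values():
--         for i in range(1, len(seq), 2):
--             start = max(0, i - max_seq_len)
--             history = seq[start:i]
--             target = seq[i]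
--             samples.append((history, target))
--
--     return samples
-- ===== SOURCE B (Python) =====
-- from collections import deque
--
--
-- def create_csft_samples(train_sequences, max_seq_len=10):
--     """Single forward pass per sequence: a rolling-window deque replaces per-index slicing."""
--     samples = []
--     window_len = max(max_seq_len, 0)
--     for seq in train_sequences.values():
--         window = deque(maxlen=window_len)
--         for i, item in enumerate(seq):
--             if i % 2 == 1:
--                 samples.append((list(window), item))
--             window.append(item)
--     return samples
-- ===== Notes on version B (the rewrite author's own statement) =====
-- stated objective: alternative
-- what changed: Replaces per-target slicing seq[max(0,i-max_seq_len):i] with a single forward pass per sequence that maintains a rolling history window in a bounded deque, emitting (history, target) at each odd index.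
import Mathlib
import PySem

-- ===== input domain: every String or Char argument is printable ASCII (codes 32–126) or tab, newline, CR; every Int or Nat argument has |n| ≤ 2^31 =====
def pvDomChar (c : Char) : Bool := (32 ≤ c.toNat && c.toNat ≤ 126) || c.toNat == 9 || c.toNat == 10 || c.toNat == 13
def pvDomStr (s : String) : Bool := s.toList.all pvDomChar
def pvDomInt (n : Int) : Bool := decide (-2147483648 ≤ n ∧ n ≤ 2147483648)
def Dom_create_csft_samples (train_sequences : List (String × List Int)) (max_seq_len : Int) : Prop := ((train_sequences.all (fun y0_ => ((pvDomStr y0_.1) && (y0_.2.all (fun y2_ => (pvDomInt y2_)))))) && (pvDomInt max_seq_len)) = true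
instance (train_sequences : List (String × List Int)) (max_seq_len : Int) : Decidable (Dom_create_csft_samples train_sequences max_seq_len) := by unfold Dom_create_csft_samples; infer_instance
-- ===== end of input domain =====

-- B builds each history incrementally in a bounded rolling window during one forward pass per
-- sequence, instead of A's per-target slice seq[max(0,i-max_seq_len):i]; same results, no speed claim.

-- ===== PORT A =====
def create_csft_samples (train_sequences : List (String × List Int)) (max_seq_len : Int) : List (List Int × Int) :=
  train_sequences.foldl (fun samples kv =>
    (PySem.List.pyRange 1 (kv.2.length : Int) 2).foldl (fun samples i =>
      let start : Int := max 0 (i - max_seq_len)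
      let history := PySem.List.slice kv.2 (some start) (some i)
      -- seq[i]: i ∈ range(1, len(seq), 2) is always in range, so the default is unreachable
      let target := PySem.List.pyGetD kv.2 i 0
      samples ++ [(history, target)]) samples) []

-- ===== PORT B =====
-- window.append(item) on a deque with maxlen = window_len: append, then drop from the front to capacity
def pvPush (cap : Nat) (w : List Int) (x : Int) : List Int :=
  let w' := w ++ [x]
  if cap < w'.length then w'.drop (w'.length - cap) else w'

def create_csft_samples_alt (train_sequences : List (String × List Int)) (max_seq_len : Int) : List (List Int × Int) :=
  let cap : Nat := (max max_seq_len 0).toNat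
  train_sequences.foldl (fun samples kv =>
    ((PySem.List.enumerate kv.2 0).foldl
      (fun acc p =>
        (if PySem.Int.mod p.1 2 == 1 then acc.1 ++ [(acc.2, p.2)] else acc.1,
         pvPush cap acc.2 p.2))
      (samples, ([] : List Int))).1) []

-- ===== PRECONDITION & SPEC =====
def Spec_create_csft_samples (train_sequences : List (String × List Int)) (max_seq_len : Int) (out : List (List Int × Int)) : Prop := out = create_csft_samples_alt train_sequences max_seq_len
instance (train_sequences : List (String × List Int)) (max_seq_len : Int) (out : List (List Int × Int)) : Decidable (Spec_create_csft_samples train_sequences max_seq_len out) := by unfold Spec_create_csft_samples; infer_instance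

-- ===== CLAIM (what is proved, stated in full; the proofs are below) =====
def Claim_equal_create_csft_samples : Prop := ∀ (train_sequences : List (String × List Int)) (max_seq_len : Int), Dom_create_csft_samples train_sequences max_seq_len → Spec_create_csft_samples train_sequences max_seq_len (create_csft_samples train_sequences max_seq_len)

-- ===== LEMMAS AND PROOFS =====

-- the common value of both inner loops on one sequence: for each odd index i,
-- the pair ((seq.take i).drop (i - cap), seq[i])
def pvOut (cap : Nat) (seq : List Int) (i : Nat) : List Int × Int :=
  ((seq.take i).drop (i - cap), seq.getD i 0)

-- B's rolling window after the first k items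
def pvWin (cap k : Nat) (seq : List Int) : List Int := (seq.take k).drop (k - cap)

-- recursive description of B's inner loop (emissions only)
def pvSpec (cap : Nat) : Nat → List Int → List Int → List (List Int × Int)
  | _, _, [] => []
  | k, w, x :: rest => (if k % 2 = 1 then [(w, x)] else []) ++ pvSpec cap (k + 1) (pvPush cap w x) rest

lemma pvPush_win (cap : Nat) (pre : List Int) (x : Int) :
    pvPush cap (pre.drop (pre.length - cap)) x = (pre ++ [x]).drop (pre.length + 1 - cap) := by
  unfold pvPush
  by_cases h : pre.length + 1 ≤ cap
  · have h0 : pre.length - cap = 0 := by omega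
    have h1 : pre.length + 1 - cap = 0 := by omega
    simp [h0, h1]
  · have hlen : (pre.drop (pre.length - cap)).length = min cap pre.length := by
      simp; omega
    have hlen : (pre.drop (pre.length - cap)).length = min cap pre.length := by
      simp
      omega
    have hc : cap < (pre.drop (pre.length - cap) ++ [x]).length := by
      rw [List.length_append, hlen]; simp; omega
    rw [if_pos (by simpa using hc)]
    have hsplit : pre.drop (pre.length - cap) ++ [x] = (pre ++ [x]).drop (pre.length - cap) := by
      rw [List.drop_append_of_le_length (by omega)]
    rw [hsplit, List.drop_drop]
    congr 1
    simp
    omega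

lemma pvMod2_cast (k : Nat) : (PySem.Int.mod (k : Int) 2 == 1) = (k % 2 == 1) := by
  rw [PySem.Int.mod_eq_emod_of_pos (by norm_num)]
  by_cases h : k % 2 = 1
  · simp [h]; omega
  · simp [h]; omega

-- B's inner fold equals samples ++ pvSpec
lemma pvB_inner (cap : Nat) :
    ∀ (rest : List Int) (k : Nat) (w : List Int) (samples : List (List Int × Int)),
      ((PySem.List.enumerate rest (k : Int)).foldl
        (fun acc p =>
          (if PySem.Int.mod p.1 2 == 1 then acc.1 ++ [(acc.2, p.2)] else acc.1,
           pvPush cap acc.2 p.2))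
        (samples, w)).1 = samples ++ pvSpec cap k w rest := by
  intro rest
  induction rest with
  | nil => intro k w samples; simp [PySem.List.enumerate, pvSpec]
  | cons x rest ih =>
    intro k w samples
    rw [PySem.List.enumerate_cons, List.foldl_cons]
    have hcast : (k : Int) + 1 = ((k + 1 : Nat) : Int) := by push_cast; ring
    rw [hcast, ih]
    simp only [pvSpec, pvMod2_cast]
    by_cases h : k % 2 = 1 <;> simp [h]

-- both inner loops produce (List.range (n/2)).map (fun j => pvOut cap seq (1+2*j))
lemma pvSpec_eq (seq : List Int) (cap : Nat) :
    ∀ (cnt k : Nat), k + cnt = seq.length → k % 2 = 0 →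
      pvSpec cap k (pvWin cap k seq) (seq.drop k) =
        (List.range (cnt / 2)).map (fun j => pvOut cap seq (k + 1 + 2 * j)) := by
  intro cnt
  induction cnt using Nat.strong_induction_on with
  | _ cnt ih =>
    intro k hlen hk
    match cnt, hlen with
    | 0, hlen =>
      have : seq.drop k = [] := by
        apply List.drop_eq_nil_of_le; omega
      simp [this, pvSpec]
    | 1, hlen =>
      have hk1 : k < seq.length := by omega
      rw [List.drop_eq_getElem_cons hk1]
      have : seq.drop (k + 1) = [] := by
        apply List.drop_eq_nil_of_le; omega
      simp [pvSpec, this, hk]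
    | (c + 2), hlen =>
      have hk1 : k < seq.length := by omega
      have hk2 : k + 1 < seq.length := by omega
      -- two unfoldings of pvSpec
      rw [List.drop_eq_getElem_cons hk1]
      have hwin1 : pvPush cap (pvWin cap k seq) seq[k] = pvWin cap (k + 1) seq := by
        unfold pvWin
        have htk : (seq.take k).length = k := by simp; omega
        have := pvPush_win cap (seq.take k) seq[k]
        rw [htk] at this
        rw [this]
        congr 1
        exact List.take_concat_get' seq k hk1
      have hwin2 : pvPush cap (pvWin cap (k + 1) seq) seq[k + 1] = pvWin cap (k + 2) seq := by
        unfold pvWin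
        have htk : (seq.take (k + 1)).length = k + 1 := by simp; omega
        have := pvPush_win cap (seq.take (k + 1)) seq[k + 1]
        rw [htk] at this
        rw [this]
        congr 1
        exact List.take_concat_get' seq (k + 1) hk2
      have hodd : ¬ (k % 2 = 1) := by omega
      rw [show pvSpec cap k (pvWin cap k seq) (seq[k] :: seq.drop (k + 1)) =
            pvSpec cap (k + 1) (pvPush cap (pvWin cap k seq) seq[k]) (seq.drop (k + 1)) by
        simp [pvSpec, hodd]]
      rw [hwin1, List.drop_eq_getElem_cons hk2]
      have hodd1 : (k + 1) % 2 = 1 := by omega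
      rw [show pvSpec cap (k + 1) (pvWin cap (k + 1) seq) (seq[k + 1] :: seq.drop (k + 1 + 1)) =
            (pvWin cap (k + 1) seq, seq[k + 1]) ::
              pvSpec cap (k + 2) (pvPush cap (pvWin cap (k + 1) seq) seq[k + 1]) (seq.drop (k + 2)) by
        simp [pvSpec, hodd1]]
      rw [hwin2, ih c (by omega) (k + 2) (by omega) (by omega)]
      have hdiv : (c + 2) / 2 = c / 2 + 1 := by omega
      rw [hdiv, List.range_succ_eq_map]
      simp only [List.map_cons, List.map_map]
      congr 1
      · unfold pvOut pvWin
        rw [List.getD_eq_getElem seq 0 hk2]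
      · apply List.map_congr_left
        intro j _
        simp only [Function.comp]
        congr 1
        omega

-- A's mapped body equals pvOut at the corresponding Nat index
lemma pvA_body (seq : List Int) (m : Int) (i : Nat) :
    (PySem.List.slice seq (some (max 0 ((i : Int) - m))) (some (i : Int)),
      PySem.List.pyGetD seq (i : Int) 0) = pvOut ((max m 0).toNat) seq i := by
  unfold pvOut
  have h1 : PySem.List.pyGetD seq (i : Int) 0 = seq.getD i 0 := PySem.List.pyGetD_natCast seq i 0
  rw [h1]
  congr 1
  rw [PySem.List.slice_toNat seq (le_max_left 0 _) (by positivity)]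
  rw [List.drop_take]
  rcases le_total m 0 with hm | hm
  · -- window capacity 0: both sides are empty lists
    have hcap : (max m 0).toNat = 0 := by rw [max_eq_right hm]; rfl
    have hcnt : (i : Int).toNat - (max 0 ((i : Int) - m)).toNat = 0 := by
      rw [max_eq_right (by omega : (0 : Int) ≤ (i : Int) - m)]
      omega
    rw [hcap, hcnt]
    simp
  · have ha : (max 0 ((i : Int) - m)).toNat = i - (max m 0).toNat := by
      rw [max_eq_left hm]
      rcases le_total ((i : Int) - m) 0 with h2 | h2
      · rw [max_eq_left h2]; omega
      · rw [max_eq_right h2]; omega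
    have hb : (i : Int).toNat = i := by omega
    rw [ha, hb]

-- A's inner fold, flattened
lemma pvA_inner (seq : List Int) (m : Int) (samples : List (List Int × Int)) :
    (PySem.List.pyRange 1 (seq.length : Int) 2).foldl (fun samples i =>
        samples ++ [(PySem.List.slice seq (some (max 0 (i - m))) (some i),
                     PySem.List.pyGetD seq i 0)]) samples =
      samples ++ (List.range (seq.length / 2)).map
        (fun j => pvOut ((max m 0).toNat) seq (1 + 2 * j)) := by
  rw [PySem.List.foldl_append_singleton_eq_map]
  congr 1
  rw [PySem.List.pyRange_of_pos 1 (seq.length : Int) (by norm_num)]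
  have hcnt : (if (1 : Int) < (seq.length : Int) then (((seq.length : Int) - 1 + 2 - 1) / 2).toNat else 0)
      = seq.length / 2 := by
    split <;> omega
  rw [hcnt, List.map_map]
  apply List.map_congr_left
  intro j _
  simp only [Function.comp]
  have hcast : (1 : Int) + 2 * (j : Int) = ((1 + 2 * j : Nat) : Int) := by push_cast; ring
  rw [hcast, pvA_body seq m (1 + 2 * j)]

-- the two inner loops agree on every sequence and accumulator
lemma pv_inner_eq (seq : List Int) (m : Int) (samples : List (List Int × Int)) :
    (PySem.List.pyRange 1 (seq.length : Int) 2).foldl (fun samples i =>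
        samples ++ [(PySem.List.slice seq (some (max 0 (i - m))) (some i),
                     PySem.List.pyGetD seq i 0)]) samples =
      ((PySem.List.enumerate seq 0).foldl
        (fun acc p =>
          (if PySem.Int.mod p.1 2 == 1 then acc.1 ++ [(acc.2, p.2)] else acc.1,
           pvPush ((max m 0).toNat) acc.2 p.2))
        (samples, ([] : List Int))).1 := by
  rw [pvA_inner]
  have h0 : ((0 : Nat) : Int) = (0 : Int) := rfl
  rw [show (PySem.List.enumerate seq 0) = (PySem.List.enumerate seq ((0 : Nat) : Int)) from rfl]
  rw [pvB_inner ((max m 0).toNat) seq 0 [] samples]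
  congr 1
  have hwin0 : pvWin ((max m 0).toNat) 0 seq = [] := by simp [pvWin]
  have := pvSpec_eq seq ((max m 0).toNat) seq.length 0 (by omega) (by omega)
  rw [hwin0, List.drop_zero] at this
  rw [this]

-- ===== VERDICT (by name: the statement is the Claim_ definition above) =====
theorem create_csft_samples_spec : Claim_equal_create_csft_samples := by
  intro ts m hD
  clear hD
  unfold Spec_create_csft_samples create_csft_samples create_csft_samples_alt
  induction ts using List.reverseRecOn with
  | nil => rfl
  | append_singleton ts kv ih =>
    rw [List.foldl_append, List.foldl_append, List.foldl_cons, List.foldl_cons,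
        List.foldl_nil, List.foldl_nil, ih]
    exact pv_inner_eq kv.2 m _
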